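-- pv_equiv track=rewrite | github.com/scoreevil/nndl-project | utils/evaluators/meteor_evaluator.py | _count_chunks
-- ===== SOURCE A (Python) =====
-- from typing import List, Dict
--
-- def _count_chunks(candidate: List[str], alignment: Dict[int, int]) -> int:
--     """
--     计算匹配的词块（chunks）数量
--
--     词块：候选句中相邻且都匹配的连续词序列
--
--     Args:
--         candidate: 候选句单词列表
--         alignment: 对齐字典
--
--     Returns:
--         词块数量
--     """
--     if len(alignment) == 0:
--         return 0
--
--     # 获取所有对齐的候选句索引（排序）
--     aligned_indices = sorted(alignment.keys())
--
--     if len(aligned_indices) == 0: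
--         return 0
--
--     # 计算连续词块
--     chunks = 1
--     for i in range(1, len(aligned_indices)):
--         # 如果当前索引和上一个索引不连续，则开始新的词块
--         if aligned_indices[i] != aligned_indices[i-1] + 1:
--             chunks += 1
--
--     return chunks
-- ===== SOURCE B (Python) =====
-- def _count_chunks(candidate, alignment):
--     keys = set(alignment.keys())
--     return sum(1 for i in keys if i - 1 not in keys)
-- ===== Notes on version B (the rewrite author's own statement) =====
-- stated objective: alternative
-- what changed: Counts chunk-start indices (keys whose predecessor is not a key) via set membership, replacing A's sort followed by an adjacent-pair scan with per-key predecessor probes.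
import Mathlib
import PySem

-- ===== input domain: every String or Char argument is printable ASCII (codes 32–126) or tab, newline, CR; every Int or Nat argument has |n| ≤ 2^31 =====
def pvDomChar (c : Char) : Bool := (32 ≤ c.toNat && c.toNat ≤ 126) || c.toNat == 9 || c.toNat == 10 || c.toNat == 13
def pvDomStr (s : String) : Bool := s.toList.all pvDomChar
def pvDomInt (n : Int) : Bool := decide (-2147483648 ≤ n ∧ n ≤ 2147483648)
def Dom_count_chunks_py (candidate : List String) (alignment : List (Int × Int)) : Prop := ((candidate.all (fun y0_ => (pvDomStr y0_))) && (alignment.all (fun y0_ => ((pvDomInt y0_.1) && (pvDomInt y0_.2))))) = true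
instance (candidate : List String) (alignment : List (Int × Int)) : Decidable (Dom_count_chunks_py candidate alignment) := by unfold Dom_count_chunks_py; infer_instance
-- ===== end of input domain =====

-- B counts chunk-start indices (keys whose predecessor is not a key) over the key set,
-- replacing A's sort + adjacent-pair scan; equivalence proved on all inputs (alternative decomposition).


-- ===== PORT A =====
-- literal transliteration of _count_chunks: sort the dict's keys, then count
-- non-consecutive adjacent pairs with a for-loop over range(1, len(aligned_indices))
def count_chunks_py (candidate : List String) (alignment : List (Int × Int)) : Int :=
  let d := PySem.Dict.ofList alignment
  if d.size = 0 then 0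
  else
    let aligned := PySem.List.sorted d.keys (fun x => x) false
    if aligned.length = 0 then 0
    else
      (PySem.List.pyRange 1 (aligned.length : Int) 1).foldl
        (fun chunks i =>
          if PySem.List.pyGetD aligned i 0 ≠ PySem.List.pyGetD aligned (i - 1) 0 + 1
          then chunks + 1 else chunks) 1

-- ===== PORT B =====
-- literal transliteration of Source B: keys = set(alignment.keys());
-- sum(1 for i in keys if i - 1 not in keys)  (a 0/1-sum over the set is countP)
def count_chunks_py_alt (candidate : List String) (alignment : List (Int × Int)) : Int :=
  let keys : PySem.Set Int := PySem.Set.ofList ((PySem.Dict.ofList alignment).keys)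
  (keys.countP (fun i => !(PySem.Set.contains keys (i - 1))) : Int)

-- ===== PRECONDITION & SPEC =====
def Spec_count_chunks_py (candidate : List String) (alignment : List (Int × Int)) (out : Int) : Prop := out = count_chunks_py_alt candidate alignment
instance (candidate : List String) (alignment : List (Int × Int)) (out : Int) : Decidable (Spec_count_chunks_py candidate alignment out) := by unfold Spec_count_chunks_py; infer_instance

-- ===== CLAIM (what is proved, stated in full; the proofs are below) =====
def Claim_equal_count_chunks_py : Prop := ∀ (candidate : List String) (alignment : List (Int × Int)), Dom_count_chunks_py candidate alignment → Spec_count_chunks_py candidate alignment (count_chunks_py candidate alignment)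

-- ===== LEMMAS AND PROOFS =====

-- index shift: the range(1, len)-indexed gap count is the adjacent-pair gap count
theorem pv_shift (t : List Int) (a : Int) :
    (List.range t.length).countP
      (fun k => decide (t.getD k 0 ≠ (a :: t).getD k 0 + 1))
    = ((a :: t).zip t).countP (fun p => decide (p.2 ≠ p.1 + 1)) := by
  induction t generalizing a with
  | nil => simp
  | cons b t' ih =>
    have hc : (List.range t'.length).countP
        ((fun k => decide ((b :: t').getD k 0 ≠ (a :: b :: t').getD k 0 + 1)) ∘ Nat.succ)
        = (List.range t'.length).countP (fun k => decide (t'.getD k 0 ≠ (b :: t').getD k 0 + 1)) := by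
      apply List.countP_congr
      intro k _
      simp [Function.comp]
    simp only [List.length_cons, List.range_succ_eq_map, List.countP_cons, List.countP_map,
      List.zip_cons_cons]
    rw [hc, ih b]
    simp only [List.getD_cons_zero]

-- A's loop on a nonempty list computes 1 + (number of non-consecutive adjacent pairs)
theorem pv_A_loop (a : Int) (t : List Int) :
    (PySem.List.pyRange 1 ((a :: t).length : Int) 1).foldl
        (fun chunks i =>
          if PySem.List.pyGetD (a :: t) i 0 ≠ PySem.List.pyGetD (a :: t) (i - 1) 0 + 1
          then chunks + 1 else chunks) 1
    = 1 + (((a :: t).zip t).countP (fun p => decide (p.2 ≠ p.1 + 1)) : Int) := by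
  rw [PySem.List.foldl_ite_add_one]
  congr 1
  rw [PySem.List.pyRange_one]
  simp only [List.countP_map]
  have hlen : (((a :: t).length : Int) - 1).toNat = t.length := by
    simp [List.length_cons]
  rw [hlen, ← pv_shift t a]
  refine congrArg _ (List.countP_congr ?_)
  intro k hk
  have h1 : (1 : Int) + (k : Int) = ((k + 1 : Nat) : Int) := by push_cast; ring
  simp only [Function.comp, h1, PySem.List.pyGetD_natCast]
  simp

-- on a strictly increasing nonempty list, 1 + gap count = number of chunk starts
theorem pv_starts (a : Int) (t : List Int) (h : (a :: t).Pairwise (· < ·)) :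
    (a :: t).countP (fun k => !decide ((k - 1) ∈ (a :: t)))
    = 1 + ((a :: t).zip t).countP (fun p => decide (p.2 ≠ p.1 + 1)) := by
  induction t generalizing a with
  | nil => simp
  | cons b t' ih =>
    have hab : a < b := (List.pairwise_cons.mp h).1 b (by simp)
    have hat' : ∀ x ∈ t', a < x := fun x hx => (List.pairwise_cons.mp h).1 x (by simp [hx])
    have htail : (b :: t').Pairwise (· < ·) := (List.pairwise_cons.mp h).2
    have hbt' : ∀ x ∈ t', b < x := fun x hx => (List.pairwise_cons.mp htail).1 x hx
    have ihb := ih b htail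
    -- head b of the tail list is always a chunk start w.r.t. (b :: t')
    have hPb : (!decide ((b - 1) ∈ (b :: t'))) = true := by
      simp only [Bool.not_eq_true', decide_eq_false_iff_not]
      intro hmem
      rcases List.mem_cons.mp hmem with h1 | h1
      · omega
      · have := hbt' _ h1; omega
    rw [List.countP_cons] at ihb
    -- the tail elements see the same membership in (a :: b :: t') and (b :: t')
    have hcong : t'.countP (fun k => !decide ((k - 1) ∈ (a :: b :: t')))
        = t'.countP (fun k => !decide ((k - 1) ∈ (b :: t'))) := by
      apply List.countP_congr
      intro x hx
      have hbx := hbt' x hx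
      simp only [List.mem_cons]
      have : ¬ (x - 1 = a) := by omega
      simp [this]
    simp only [List.countP_cons, List.zip_cons_cons] at *
    rw [hcong]
    have hPa : (!decide ((a - 1) ∈ (a :: b :: t'))) = true := by
      simp only [Bool.not_eq_true', decide_eq_false_iff_not]
      intro hmem
      rcases List.mem_cons.mp hmem with h1 | h1
      · omega
      · rcases List.mem_cons.mp h1 with h2 | h2
        · omega
        · have := hat' _ h2; omega
    have hPb' : (!decide ((b - 1) ∈ (a :: b :: t'))) = (decide (b ≠ a + 1)) := by
      by_cases hba : b = a + 1
      · simp [hba]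
      · have : ¬ ((b - 1) ∈ (a :: b :: t')) := by
          intro hmem
          rcases List.mem_cons.mp hmem with h1 | h1
          · omega
          · rcases List.mem_cons.mp h1 with h2 | h2
            · omega
            · have := hbt' _ h2; omega
        simp [this, hba]
    rw [hPa, hPb']
    rw [hPb] at ihb
    by_cases hba : b = a + 1 <;> simp [hba] at * <;> omega

-- ===== VERDICT (by name: the statement is the Claim_ definition above) =====
theorem count_chunks_py_spec : Claim_equal_count_chunks_py := by
  intro candidate alignment _
  unfold Spec_count_chunks_py count_chunks_py count_chunks_py_alt
  set K := (PySem.Dict.ofList alignment).keys with hK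
  have hnd : K.Nodup := PySem.Dict.nodup_keys_ofList alignment
  have hset : PySem.Set.ofList K = K := PySem.Set.ofList_eq_self_of_nodup K hnd
  have hsize : (PySem.Dict.ofList alignment).size = K.length := by
    simp [PySem.Dict.size, PySem.Dict.keys, hK]
  by_cases hnil : K = []
  · simp [hsize, hnil]
  · have hlen : K.length ≠ 0 := by simpa [List.length_eq_zero_iff] using hnil
    simp only [hsize, hset, if_neg hlen]
    set l := PySem.List.sorted K (fun x => x) false with hl
    have hperm : l.Perm K := PySem.List.sorted_perm K (fun x => x) false
    have hlnil : l ≠ [] := by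
      intro h0
      have hle := hperm.length_eq
      rw [h0] at hle
      exact hnil (List.length_eq_zero_iff.mp hle.symm)
    have hllen : l.length ≠ 0 := by simpa [List.length_eq_zero_iff] using hlnil
    rw [if_neg hllen]
    obtain ⟨a, t, hat⟩ := List.exists_cons_of_ne_nil hlnil
    have hpw : l.Pairwise (· < ·) := by
      have := PySem.List.sorted_ofList_pairwise_lt K
      simpa [hset, hl] using this
    rw [hat] at hpw ⊢
    rw [pv_A_loop]
    -- B's per-key predicate counts the same elements
    have hBcong : K.countP (fun i => !(PySem.Set.contains K (i - 1)))
        = K.countP (fun k => !decide ((k - 1) ∈ (a :: t))) := by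
      apply List.countP_congr
      intro x _
      have hmem : ((x - 1) ∈ K) ↔ ((x - 1) ∈ (a :: t)) := by
        rw [← hat]; exact (hperm.mem_iff).symm
      simp [PySem.Set.contains_eq_listContains, hmem]
    have hBperm : K.countP (fun k => !decide ((k - 1) ∈ (a :: t)))
        = (a :: t).countP (fun k => !decide ((k - 1) ∈ (a :: t))) := by
      rw [← hat]; exact (hperm.countP_eq _).symm
    rw [hBcong, hBperm, pv_starts a t hpw]
    push_cast
    ring
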